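-- pv_equiv track=rewrite | github.com/ClassicRevive/leetrank | leetcode/unique_occurences_1207.py | uniqueOccurrences_nlogn
-- ===== SOURCE A (Python) =====
-- from typing import List
--
-- def uniqueOccurrences_nlogn(arr: List[int]) -> bool:
--     ''' This is O(n*logn) due to the sorting '''
--     from collections import defaultdict
--
--     # store frequencies
--     counts = defaultdict(int)
--     for i in range(len(arr)):
--         counts[arr[i]] += 1
--
--     # sort frequencies and iterate through
--     counts = sorted(counts.values())
--     prev = 0
--     for i in range(len(counts)):
--         if counts[i] == prev:
--             return False
--         prev = counts[i]
--
--     return True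
-- ===== SOURCE B (Python) =====
-- from typing import List
--
-- def uniqueOccurrences_nlogn(arr: List[int]) -> bool:
--     from collections import Counter
--     counts = Counter(arr)
--     meta = Counter(counts.values())
--     return all(c == 1 for c in meta.values())
-- ===== Notes on version B (the rewrite author's own statement) =====
-- stated objective: simpler
-- what changed: Replaces the sort of the frequency values and the prev-tracking adjacent-comparison loop with a second Counter over those values (frequency-of-frequencies), returning True iff every meta-count is 1.
import Mathlib
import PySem

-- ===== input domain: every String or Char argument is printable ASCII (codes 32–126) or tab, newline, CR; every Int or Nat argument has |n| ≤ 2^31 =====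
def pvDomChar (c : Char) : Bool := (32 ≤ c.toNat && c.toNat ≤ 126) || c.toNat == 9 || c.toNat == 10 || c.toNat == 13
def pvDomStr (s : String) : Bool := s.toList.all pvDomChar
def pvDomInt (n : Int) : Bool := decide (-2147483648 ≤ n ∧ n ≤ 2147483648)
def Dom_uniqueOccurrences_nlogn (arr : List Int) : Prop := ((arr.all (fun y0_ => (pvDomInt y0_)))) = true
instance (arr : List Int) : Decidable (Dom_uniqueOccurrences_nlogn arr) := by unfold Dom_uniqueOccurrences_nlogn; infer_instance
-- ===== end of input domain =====

-- B replaces A's sort-then-adjacent-compare over the frequency values by a second frequency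
-- table over those values, returning true iff every meta-count is 1 (objective: simpler).

-- ===== PORT A =====
-- the 'prev'-tracking scan over the sorted frequency list
def uniqALoop : Int → List Int → Bool
  | _, [] => true
  | prev, c :: rest => if c = prev then false else uniqALoop c rest

def uniqueOccurrences_nlogn (arr : List Int) : Bool :=
  let counts := arr.foldl (fun d x => d.modify x 0 (· + 1)) PySem.Dict.empty
  let vals := PySem.List.sorted counts.values (fun x => x) false
  uniqALoop 0 vals

-- ===== PORT B =====
def uniqueOccurrences_nlogn_alt (arr : List Int) : Bool :=
  let counts := PySem.Dict.counter arr
  let fof := PySem.Dict.counter counts.values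
  fof.values.all (fun c => c == 1)

-- ===== PRECONDITION & SPEC =====
def Spec_uniqueOccurrences_nlogn (arr : List Int) (out : Bool) : Prop := out = uniqueOccurrences_nlogn_alt arr
instance (arr : List Int) (out : Bool) : Decidable (Spec_uniqueOccurrences_nlogn arr out) := by unfold Spec_uniqueOccurrences_nlogn; infer_instance

-- ===== CLAIM (what is proved, stated in full; the proofs are below) =====
def Claim_equal_uniqueOccurrences_nlogn : Prop := ∀ (arr : List Int), Dom_uniqueOccurrences_nlogn arr → Spec_uniqueOccurrences_nlogn arr (uniqueOccurrences_nlogn arr)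

-- ===== LEMMAS AND PROOFS =====

-- A's scan succeeds iff no two consecutive elements of (prev :: l) are equal
theorem uniqALoop_eq_true_iff (prev : Int) (l : List Int) :
    uniqALoop prev l = true ↔ List.IsChain (· ≠ ·) (prev :: l) := by
  induction l generalizing prev with
  | nil => simp [uniqALoop]
  | cons c rest ih =>
    simp only [uniqALoop, List.isChain_cons_cons]
    by_cases h : c = prev
    · simp [h]
    · simp [h, ih c, Ne.symm h]

-- on a ≤-sorted list, consecutive-distinct is exactly Nodup
theorem chain_ne_iff_nodup (l : List Int) (hs : l.Pairwise (· ≤ ·)) :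
    List.IsChain (· ≠ ·) l ↔ l.Nodup := by
  induction l with
  | nil => simp
  | cons a t ih =>
    rcases List.pairwise_cons.mp hs with ⟨hle, ht⟩
    rw [List.isChain_cons, List.nodup_cons, ih ht]
    constructor
    · rintro ⟨hhd, hch⟩
      refine ⟨?_, hch⟩
      intro hmem
      cases t with
      | nil => simp at hmem
      | cons b t' =>
        have hab : a ≠ b := hhd b (by simp)
        have hba : b ≤ a := by
          rcases List.mem_cons.mp hmem with h | h
          · exact (hab h).elim
          · rcases List.pairwise_cons.mp ht with ⟨hb, _⟩
            exact hb a h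
        exact hab (le_antisymm (hle b (by simp)) hba)
    · rintro ⟨hna, hnd⟩
      refine ⟨?_, hnd⟩
      intro b hb
      exact fun hEq => hna (hEq ▸ List.mem_of_mem_head? hb)

-- every value of Counter(arr) is positive
theorem counter_values_pos (arr : List Int) :
    ∀ v ∈ (PySem.Dict.counter arr).values, 0 < v := by
  intro v hv
  have : (PySem.Dict.counter arr).values
      = ((PySem.Dict.counter arr).items).map (·.2) := rfl
  rw [this, PySem.Dict.items_counter] at hv
  simp only [List.map_map, List.mem_map] at hv
  rcases hv with ⟨k, hk, hkv⟩
  have hkmem : k ∈ arr := (PySem.Set.mem_ofList arr k).mp hk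
  have : 0 < arr.count k := List.count_pos_iff.mpr hkmem
  simp only [Function.comp] at hkv
  omega

-- B's result characterised: every element of vs occurs exactly once in vs
theorem alt_all_iff (vs : List Int) :
    ((PySem.Dict.counter vs).values.all (fun c => c == 1)) = true ↔ ∀ v ∈ vs, vs.count v = 1 := by
  have hval : (PySem.Dict.counter vs).values
      = ((PySem.Dict.counter vs).items).map (·.2) := rfl
  rw [hval, PySem.Dict.items_counter]
  simp only [List.all_eq_true, List.map_map, List.mem_map, Function.comp]
  constructor
  · intro h v hv
    have := h ((vs.count v : Int)) ⟨v, (PySem.Set.mem_ofList vs v).mpr hv, rfl⟩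
    simpa using this
  · rintro h c ⟨k, hk, rfl⟩
    have := h k ((PySem.Set.mem_ofList vs k).mp hk)
    simp [this]

-- ===== VERDICT (by name: the statement is the Claim_ definition above) =====
theorem uniqueOccurrences_nlogn_spec : Claim_equal_uniqueOccurrences_nlogn := by
  intro arr _
  show uniqueOccurrences_nlogn arr = uniqueOccurrences_nlogn_alt arr
  unfold uniqueOccurrences_nlogn uniqueOccurrences_nlogn_alt
  rw [← PySem.Dict.counter_eq_foldl]
  set vs := (PySem.Dict.counter arr).values with hvs
  have hpos : ∀ v ∈ vs, 0 < v := counter_values_pos arr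
  rw [Bool.eq_iff_iff]
  rw [uniqALoop_eq_true_iff, alt_all_iff, ← List.nodup_iff_count_eq_one]
  set s := PySem.List.sorted vs (fun x => x) false with hsrt
  have hperm : s.Perm vs := PySem.List.sorted_perm vs (fun x => x) false
  have hpair : s.Pairwise (· ≤ ·) := PySem.List.sorted_pairwise vs (fun x => x)
  constructor
  · intro hch
    have : List.IsChain (· ≠ ·) s := (List.isChain_cons.mp hch).2
    exact hperm.nodup_iff.mp ((chain_ne_iff_nodup s hpair).mp this)
  · intro hnd
    have hnds : s.Nodup := hperm.nodup_iff.mpr hnd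
    rw [List.isChain_cons]
    refine ⟨?_, (chain_ne_iff_nodup s hpair).mpr hnds⟩
    intro b hb
    have : 0 < b := hpos b (hperm.mem_iff.mp (List.mem_of_mem_head? hb))
    omega
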